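-- pv_equiv track=rewrite | github.com/AChurakov/homeworks | RepeatedString/RepeatedString.py | get_most_com_sub
-- ===== SOURCE A (Python) =====
-- def get_most_com_sub(s):
--         sub = {}
--         max_value = 0
--         for i in range(len(s)):
--             count = 0
--             sub_value  = s[i]
--             while i+1 < len(s) and s[i] <= s[i+1]:
--                 count += 1
--                 i += 1
--                 sub_value += s[i]
--             sub[count] = sub.get(count, sub_value)
--             max_value = max(sub.keys())
--         return s.count(sub[max_value])
-- ===== SOURCE B (Python) =====
-- def get_most_com_sub(s):
--     n = len(s)
--     run = [1] * n
--     for i in range(n - 2, -1, -1):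
--         if s[i] <= s[i + 1]:
--             run[i] = run[i + 1] + 1
--     best = max(run)
--     k = run.index(best)
--     return s.count(s[k:k + best])
-- ===== Notes on version B (the rewrite author's own statement) =====
-- stated objective: faster
-- what changed: A rescans the whole non-decreasing run from every starting index and keeps a dict of first substrings per length; B computes all run lengths in one backward DP pass, takes the first index of the maximal length and counts that one substring.
-- outside the precondition, e.g. on get_most_com_sub(''): A raises KeyError, B raises ValueError
import Mathlib
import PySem

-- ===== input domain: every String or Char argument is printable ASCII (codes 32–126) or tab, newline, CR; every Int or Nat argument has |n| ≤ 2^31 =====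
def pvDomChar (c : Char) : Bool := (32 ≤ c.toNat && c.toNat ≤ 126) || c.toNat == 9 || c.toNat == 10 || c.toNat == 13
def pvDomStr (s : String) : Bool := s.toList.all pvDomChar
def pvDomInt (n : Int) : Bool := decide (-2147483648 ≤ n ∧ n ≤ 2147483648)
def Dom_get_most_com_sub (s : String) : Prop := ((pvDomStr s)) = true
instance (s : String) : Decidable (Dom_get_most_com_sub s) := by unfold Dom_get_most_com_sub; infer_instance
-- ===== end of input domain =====

-- B replaces A's per-index rescans of the whole run by one backward DP pass over run lengths (objective: faster).
-- Python str values are carried as List Char (code points); s.count(t) is PySem.Chars.count on the lists, exact by PySem.Str.count_eq.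

-- ===== PORT A =====
-- inner while loop: `while i+1 < len(s) and s[i] <= s[i+1]: count += 1; i += 1; sub_value += s[i]`
-- (s[i]/s[i+1] read via getD: the guard `i+1 < len` keeps every read index in range, so getD is exact)
def pvInnerA (cs : List Char) (i : Nat) (count : Int) (subv : List Char) : Int × List Char :=
  if h : i + 1 < cs.length ∧ cs.getD i ' ' ≤ cs.getD (i + 1) ' ' then
    pvInnerA cs (i + 1) (count + 1) (subv ++ [cs.getD (i + 1) ' '])
  else (count, subv)
termination_by cs.length - i
decreasing_by omega

-- one iteration of the `for i in range(len(s))` body; state = (sub, max_value).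
-- max(sub.keys()): sub is nonempty at every use (a key was just inserted), so Python's max returns; getD 0 is unreachable.
def pvStepA (cs : List Char) (st : PySem.Dict Int (List Char) × Int) (i : Nat) :
    PySem.Dict Int (List Char) × Int :=
  let r := pvInnerA cs i 0 [cs.getD i ' ']
  let sub := st.1.insert r.1 (st.1.getD r.1 r.2)
  (sub, (PySem.List.max? (PySem.Dict.keys sub) id).getD 0)

-- `sub[max_value]` raises KeyError only for s = "" (empty dict); that input is excluded by Pre_, so getD [] is unreachable.
def get_most_com_sub (s : String) : Int :=
  let cs := s.toList
  let st := (PySem.List.pyRange 0 (cs.length : Int)).foldl (fun st i => pvStepA cs st i.toNat)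
      (PySem.Dict.empty, 0)
  ((PySem.Chars.count cs (st.1.getD st.2 [])) : Int)

-- ===== PORT B =====
-- the backward fill `for i in range(n-2,-1,-1): if s[i] <= s[i+1]: run[i] = run[i+1] + 1`,
-- written right-to-left: the head of the already-filled tail is run[i+1] (always present, headD 0 unreachable)
def pvRunLens : List Char → List Int
  | [] => []
  | [_] => [1]
  | c :: d :: rest =>
      let t := pvRunLens (d :: rest)
      (if c ≤ d then t.headD 0 + 1 else 1) :: t

-- max(run) / run.index(best) raise only for s = "" (excluded by Pre_); their getD defaults are unreachable.
def get_most_com_sub_alt (s : String) : Int :=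
  let cs := s.toList
  let run := pvRunLens cs
  let best := (PySem.List.max? run id).getD 0
  let k := (PySem.List.index? run best).getD 0
  ((PySem.Chars.count cs (PySem.List.slice cs (some (k : Int)) (some ((k : Int) + best)))) : Int)

-- ===== PRECONDITION & SPEC =====
-- Pre_ excludes only the empty string: there A raises KeyError (sub[0] on the empty dict) and B raises ValueError (max of an empty list).
def Pre_get_most_com_sub (s : String) : Prop := s ≠ ""
instance (s : String) : Decidable (Pre_get_most_com_sub s) := by unfold Pre_get_most_com_sub; infer_instance
def pvWitness_get_most_com_sub : String := "ab"
def Spec_get_most_com_sub (s : String) (out : Int) : Prop := out = get_most_com_sub_alt s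
instance (s : String) (out : Int) : Decidable (Spec_get_most_com_sub s out) := by unfold Spec_get_most_com_sub; infer_instance

-- ===== CLAIM (what is proved, stated in full; the proofs are below) =====
def Claim_equal_get_most_com_sub : Prop := ∀ (s : String), Dom_get_most_com_sub s → Pre_get_most_com_sub s → Spec_get_most_com_sub s (get_most_com_sub s)

-- ===== LEMMAS AND PROOFS =====

-- length of the maximal non-decreasing run starting at index i (1 at the last index)
def pvRunN (cs : List Char) (i : Nat) : Nat :=
  if i + 1 < cs.length ∧ cs.getD i ' ' ≤ cs.getD (i + 1) ' ' then pvRunN cs (i + 1) + 1 else 1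
termination_by cs.length - i
decreasing_by omega

theorem pvRunN_pos (cs : List Char) (i : Nat) : 1 ≤ pvRunN cs i := by
  rw [pvRunN]; split <;> omega

theorem pvRunN_shift (c : Char) (cs : List Char) (i : Nat) :
    pvRunN (c :: cs) (i + 1) = pvRunN cs i := by
  suffices h : ∀ fuel i, cs.length - i ≤ fuel → pvRunN (c :: cs) (i + 1) = pvRunN cs i from
    h (cs.length - i) i le_rfl
  intro fuel
  induction fuel with
  | zero =>
    intro i hi
    conv_lhs => rw [pvRunN]
    conv_rhs => rw [pvRunN]
    rw [if_neg (by simp only [List.length_cons]; omega), if_neg (by omega)]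
  | succ n ih =>
    intro i hi
    conv_lhs => rw [pvRunN]
    conv_rhs => rw [pvRunN]
    by_cases hc : i + 1 < cs.length ∧ cs.getD i ' ' ≤ cs.getD (i + 1) ' '
    · rw [if_pos (by simp only [List.length_cons, List.getD_cons_succ]; exact ⟨by omega, hc.2⟩),
        if_pos hc, ih (i + 1) (by omega)]
    · rw [if_neg (fun h2 => hc ⟨by have := h2.1; simp only [List.length_cons] at this; omega,
        by simpa using h2.2⟩), if_neg hc]

theorem pvRunLens_eq (cs : List Char) :
    pvRunLens cs = (List.range cs.length).map (fun i => ((pvRunN cs i : Nat) : Int)) := by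
  induction cs using pvRunLens.induct with
  | case1 => simp [pvRunLens]
  | case2 c =>
    have h1 : pvRunN [c] 0 = 1 := by rw [pvRunN]; simp
    simp [pvRunLens, List.range_one, h1]
  | case3 c d rest ih =>
    simp only [pvRunLens]
    rw [ih]
    have hlen : (c :: d :: rest).length = (d :: rest).length + 1 := by simp
    rw [hlen, List.range_succ_eq_map]
    simp only [List.map_cons, List.map_map]
    have htail : ∀ i ∈ List.range (d :: rest).length,
        ((fun i => ((pvRunN (c :: d :: rest) i : Nat) : Int)) ∘ Nat.succ) i
          = (fun i => ((pvRunN (d :: rest) i : Nat) : Int)) i := by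
      intro i _
      simp only [Function.comp_apply]
      rw [show Nat.succ i = i + 1 from rfl, pvRunN_shift]
    rw [List.map_congr_left htail]
    have hhead : ((pvRunN (c :: d :: rest) 0 : Nat) : Int)
        = if c ≤ d then ((pvRunN (d :: rest) 0 : Nat) : Int) + 1 else 1 := by
      conv_lhs => rw [pvRunN]
      have h01 : (0 : Nat) + 1 = 1 := rfl
      rw [show pvRunN (c :: d :: rest) (0 + 1) = pvRunN (d :: rest) 0 from pvRunN_shift c _ 0]
      by_cases hc : c ≤ d
      · rw [if_pos ⟨by simp, by simpa using hc⟩, if_pos hc]; push_cast; ring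
      · rw [if_neg (fun h2 => hc (by simpa using h2.2)), if_neg hc]; simp
    rw [hhead]
    have hh : (List.range (d :: rest).length).map
        (fun i => ((pvRunN (d :: rest) i : Nat) : Int)) ≠ [] := by simp
    congr 1
    have : List.range (d :: rest).length = 0 :: List.map Nat.succ (List.range rest.length) := by
      simp [List.range_succ_eq_map]
    rw [this]
    simp

theorem pvInnerA_spec (cs : List Char) :
    ∀ (i : Nat) (c : Int) (v : List Char), i < cs.length →
    pvInnerA cs i c v = (c + ((pvRunN cs i - 1 : Nat) : Int),
      v ++ (cs.drop (i + 1)).take (pvRunN cs i - 1)) := by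
  suffices h : ∀ fuel i c v, cs.length - i ≤ fuel → i < cs.length →
      pvInnerA cs i c v = (c + ((pvRunN cs i - 1 : Nat) : Int),
        v ++ (cs.drop (i + 1)).take (pvRunN cs i - 1)) from
    fun i c v hi => h (cs.length - i) i c v le_rfl hi
  intro fuel
  induction fuel with
  | zero => intro i c v hf hi; omega
  | succ n ih =>
    intro i c v hf hi
    rw [pvInnerA]
    by_cases hc : i + 1 < cs.length ∧ cs.getD i ' ' ≤ cs.getD (i + 1) ' '
    · rw [dif_pos hc]
      rw [ih (i + 1) (c + 1) _ (by omega) hc.1]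
      have hr : pvRunN cs i = pvRunN cs (i + 1) + 1 := by
        conv_lhs => rw [pvRunN]
        rw [if_pos hc]
      have hp := pvRunN_pos cs (i + 1)
      rw [Prod.ext_iff]
      refine ⟨?_, ?_⟩
      · simp only
        omega
      · simp only
        rw [List.append_assoc, List.singleton_append, hr]
        congr 1
        have hdrop : cs.drop (i + 1) = cs[i + 1] :: cs.drop (i + 2) :=
          List.drop_eq_getElem_cons hc.1
        rw [hdrop]
        have : pvRunN cs (i + 1) + 1 - 1 = (pvRunN cs (i + 1) - 1) + 1 := by omega
        rw [this, List.take_succ_cons, List.getD_eq_getElem _ _ hc.1]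
    · rw [dif_neg hc]
      have hr : pvRunN cs i = 1 := by rw [pvRunN, if_neg hc]
      rw [hr]
      simp

-- the substring A's inner loop builds starting at index i
def pvVal (cs : List Char) (i : Nat) : List Char :=
  cs.getD i ' ' :: (cs.drop (i + 1)).take (pvRunN cs i - 1)

theorem pvVal_eq_take_drop (cs : List Char) (i : Nat) (h : i < cs.length) :
    pvVal cs i = (cs.drop i).take (pvRunN cs i) := by
  rw [pvVal, List.drop_eq_getElem_cons h, List.getD_eq_getElem _ _ h]
  have h1 : pvRunN cs i = (pvRunN cs i - 1) + 1 := by have := pvRunN_pos cs i; omega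
  conv_rhs => rw [h1, List.take_succ_cons]

-- max of (run length - 1) over indices < k, i.e. the largest `count` A has stored after k iterations
def pvMx (cs : List Char) : Nat → Nat
  | 0 => 0
  | k + 1 => max (pvMx cs k) (pvRunN cs k - 1)

theorem pvMx_le (cs : List Char) (k i : Nat) (h : i < k) : pvRunN cs i - 1 ≤ pvMx cs k := by
  induction k with
  | zero => omega
  | succ n ih =>
    rw [pvMx]
    rcases Nat.lt_succ_iff_lt_or_eq.mp h with h' | h'
    · exact le_trans (ih h') (le_max_left _ _)
    · subst h'; exact le_max_right _ _

theorem pvMx_attained (cs : List Char) (k : Nat) (h : 1 ≤ k) :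
    ∃ i, i < k ∧ pvRunN cs i - 1 = pvMx cs k := by
  induction k with
  | zero => omega
  | succ n ih =>
    by_cases hn : 1 ≤ n
    · obtain ⟨i, hi, he⟩ := ih hn
      rw [pvMx]
      rcases le_total (pvRunN cs n - 1) (pvMx cs n) with hle | hle
      · exact ⟨i, by omega, by rw [max_eq_left hle, he]⟩
      · exact ⟨n, by omega, by rw [max_eq_right hle]⟩
    · have : n = 0 := by omega
      subst this
      exact ⟨0, by omega, by simp [pvMx]⟩

theorem pvIdxOf?_map_range {α : Type} [BEq α] [LawfulBEq α] (n : Nat) :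
    ∀ (f : Nat → α) (v : α),
    List.idxOf? v ((List.range n).map f) = (List.range n).find? (fun i => f i == v) := by
  induction n with
  | zero => intro f v; simp
  | succ m ih =>
    intro f v
    rw [List.range_succ_eq_map]
    simp only [List.map_cons, List.map_map, List.idxOf?_cons, List.find?_cons]
    by_cases hv : f 0 == v
    · simp [beq_iff_eq.mp hv]
    · rw [if_neg (by simpa using hv)]
      rw [show (f 0 == v) = false from by simpa using hv]
      rw [List.find?_map, ih (f ∘ Nat.succ) v]
      rfl

-- state of A's loop after the first k iterations
def pvStA (cs : List Char) (k : Nat) : PySem.Dict Int (List Char) × Int :=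
  (List.range k).foldl (pvStepA cs) (PySem.Dict.empty, 0)

theorem pvStA_spec (cs : List Char) :
    ∀ (k : Nat), k ≤ cs.length →
    (∀ c : Int, (pvStA cs k).1.get? c =
        ((List.range k).find? (fun i => ((pvRunN cs i - 1 : Nat) : Int) == c)).map (pvVal cs)) ∧
    (pvStA cs k).2 = ((pvMx cs k : Nat) : Int) := by
  intro k
  induction k with
  | zero =>
    intro _
    refine ⟨fun c => ?_, by simp [pvStA, pvMx]⟩
    simp [pvStA, PySem.Dict.get?, PySem.Dict.empty]
  | succ k ih =>
    intro hk
    obtain ⟨IH1, IH2⟩ := ih (by omega)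
    have hkl : k < cs.length := by omega
    have hstep : pvStA cs (k + 1) = pvStepA cs (pvStA cs k) k := by
      rw [pvStA, pvStA, List.range_succ, List.foldl_append, List.foldl_cons, List.foldl_nil]
    have hr : pvInnerA cs k 0 [cs.getD k ' '] = (((pvRunN cs k - 1 : Nat) : Int), pvVal cs k) := by
      rw [pvInnerA_spec cs k 0 _ hkl, zero_add, List.singleton_append, pvVal]
    set ck : Int := ((pvRunN cs k - 1 : Nat) : Int) with hck
    set d := (pvStA cs k).1 with hd
    have hsub : (pvStA cs (k + 1)).1 = d.insert ck (d.getD ck (pvVal cs k)) := by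
      rw [hstep, pvStepA, hr]
    -- first component
    have h1 : ∀ c : Int, (pvStA cs (k + 1)).1.get? c =
        ((List.range (k + 1)).find? (fun i => ((pvRunN cs i - 1 : Nat) : Int) == c)).map
          (pvVal cs) := by
      intro c
      rw [hsub, PySem.Dict.get?_insert, List.range_succ, List.find?_append]
      by_cases hc : c = ck
      · rw [if_pos hc]
        have hself : List.find? (fun i => ((pvRunN cs i - 1 : Nat) : Int) == c) [k] = some k := by
          simp only [List.find?_cons, List.find?_nil]
          rw [show (((pvRunN cs k - 1 : Nat) : Int) == c) = true from beq_iff_eq.mpr hc.symm]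
        rw [PySem.Dict.getD, show ck = c from hc.symm]
        cases hf : List.find? (fun i => ((pvRunN cs i - 1 : Nat) : Int) == c) (List.range k) with
        | none =>
          have : d.get? c = none := by rw [IH1 c, hf]; rfl
          rw [this, Option.getD_none, hself]
          simp [Option.or]
        | some j =>
          have : d.get? c = some (pvVal cs j) := by rw [IH1 c, hf]; rfl
          rw [this, Option.getD_some]
          simp [Option.or]
      · rw [if_neg hc, IH1 c]
        have hnone : List.find? (fun i => ((pvRunN cs i - 1 : Nat) : Int) == c) [k] = none := by
          simp only [List.find?_cons, List.find?_nil]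
          rw [show (((pvRunN cs k - 1 : Nat) : Int) == c) = false from
            beq_eq_false_iff_ne.mpr (fun h => hc h.symm)]
        rw [hnone, Option.or_none]
    -- keys membership
    have hmem : ∀ c : Int, c ∈ (pvStA cs (k + 1)).1.keys ↔
        ∃ i, i < k + 1 ∧ ((pvRunN cs i - 1 : Nat) : Int) = c := by
      intro c
      have := PySem.Dict.get?_eq_none_iff_not_mem_keys (pvStA cs (k + 1)).1 c
      constructor
      · intro hcmem
        have hner : (pvStA cs (k + 1)).1.get? c ≠ none := by
          intro he; exact (this.mp he) hcmem
        rw [h1 c] at hner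
        have : ((List.range (k + 1)).find? (fun i => ((pvRunN cs i - 1 : Nat) : Int) == c)).isSome := by
          cases hq : (List.range (k + 1)).find? (fun i => ((pvRunN cs i - 1 : Nat) : Int) == c) with
          | none => rw [hq] at hner; exact absurd rfl hner
          | some _ => rfl
        obtain ⟨i, hi, hp⟩ := List.find?_isSome.mp this
        exact ⟨i, List.mem_range.mp hi, beq_iff_eq.mp hp⟩
      · rintro ⟨i, hi, rfl⟩
        by_contra hno
        have := this.mpr hno
        rw [h1] at this
        have hf : ((List.range (k + 1)).find? (fun j => ((pvRunN cs j - 1 : Nat) : Int)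
            == ((pvRunN cs i - 1 : Nat) : Int))).isSome := by
          rw [List.find?_isSome]
          exact ⟨i, List.mem_range.mpr hi, beq_iff_eq.mpr rfl⟩
        cases hq : (List.range (k + 1)).find? (fun j => ((pvRunN cs j - 1 : Nat) : Int)
            == ((pvRunN cs i - 1 : Nat) : Int)) with
        | none => rw [hq] at hf; exact absurd hf (by simp)
        | some _ => rw [hq] at this; exact absurd this (by simp)
    -- second component
    have hkeysne : (pvStA cs (k + 1)).1.keys ≠ [] := by
      intro he
      have := (hmem ck).mpr ⟨k, by omega, rfl⟩
      rw [he] at this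
      exact absurd this (List.not_mem_nil)
    obtain ⟨m, hm⟩ : ∃ m, PySem.List.max? (pvStA cs (k + 1)).1.keys id = some m := by
      cases hq : PySem.List.max? (pvStA cs (k + 1)).1.keys id with
      | none => exact absurd ((PySem.List.max?_eq_none_iff _ _).mp hq) hkeysne
      | some m => exact ⟨m, rfl⟩
    have hm_mem := PySem.List.max?_mem hm
    have hm_ub := PySem.List.max?_isMax hm
    have hmx_mem : ((pvMx cs (k + 1) : Nat) : Int) ∈ (pvStA cs (k + 1)).1.keys := by
      obtain ⟨i, hi, he⟩ := pvMx_attained cs (k + 1) (by omega)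
      exact (hmem _).mpr ⟨i, hi, by rw [he]⟩
    have hmeq : m = ((pvMx cs (k + 1) : Nat) : Int) := by
      obtain ⟨i, hi, he⟩ := (hmem m).mp hm_mem
      have h1' : m ≤ ((pvMx cs (k + 1) : Nat) : Int) := by
        rw [← he]
        exact_mod_cast Nat.cast_le.mpr (pvMx_le cs (k + 1) i hi)
      have h2' : ((pvMx cs (k + 1) : Nat) : Int) ≤ m := hm_ub _ hmx_mem
      omega
    refine ⟨h1, ?_⟩
    have h2c : (pvStA cs (k + 1)).2 = (PySem.List.max? (pvStA cs (k + 1)).1.keys id).getD 0 := by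
      conv_lhs => rw [hstep, pvStepA, hr]
      conv_rhs => rw [hstep, pvStepA, hr]
    rw [h2c, hm, Option.getD_some, hmeq]

theorem pv_main (s : String) (hpre : s ≠ "") : get_most_com_sub s = get_most_com_sub_alt s := by
  have hne : s.toList ≠ [] := fun h => hpre (String.toList_eq_nil_iff.mp h)
  set cs := s.toList with hcs
  set n := cs.length with hn
  have hn1 : 1 ≤ n := by
    cases h : cs with
    | nil => exact absurd h hne
    | cons a l => rw [hn, h]; simp
  -- A side
  have hfold : (PySem.List.pyRange 0 (cs.length : Int)).foldl
      (fun st i => pvStepA cs st i.toNat) (PySem.Dict.empty, 0) = pvStA cs n := by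
    rw [PySem.List.pyRange_zero_natCast, List.foldl_map, pvStA]
    simp only [Int.toNat_natCast]
    rfl
  obtain ⟨hget, hmax⟩ := pvStA_spec cs n le_rfl
  -- the first index attaining the max count
  obtain ⟨ia, hia, hea⟩ := pvMx_attained cs n hn1
  have hfsome : ((List.range n).find?
      (fun i => ((pvRunN cs i - 1 : Nat) : Int) == ((pvMx cs n : Nat) : Int))).isSome := by
    rw [List.find?_isSome]
    exact ⟨ia, List.mem_range.mpr hia, beq_iff_eq.mpr (by exact_mod_cast congrArg Nat.cast hea)⟩
  obtain ⟨i0, hf0⟩ : ∃ i0, (List.range n).find?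
      (fun i => ((pvRunN cs i - 1 : Nat) : Int) == ((pvMx cs n : Nat) : Int)) = some i0 := by
    cases hq : (List.range n).find?
        (fun i => ((pvRunN cs i - 1 : Nat) : Int) == ((pvMx cs n : Nat) : Int)) with
    | none => rw [hq] at hfsome; exact absurd hfsome (by simp)
    | some j => exact ⟨j, rfl⟩
  have hi0n : i0 < n := List.mem_range.mp (List.mem_of_find?_eq_some hf0)
  have hi0p : pvRunN cs i0 - 1 = pvMx cs n := by
    have := List.find?_some hf0
    exact_mod_cast beq_iff_eq.mp this
  have hi0r : pvRunN cs i0 = pvMx cs n + 1 := by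
    have := pvRunN_pos cs i0; omega
  have hA : get_most_com_sub s = ((PySem.Chars.count cs (pvVal cs i0)) : Int) := by
    rw [get_most_com_sub]
    simp only [← hcs, hfold]
    rw [PySem.Dict.getD, hmax, hget, hf0, Option.map_some, Option.getD_some]
  -- B side
  have hrun : pvRunLens cs = (List.range n).map (fun i => ((pvRunN cs i : Nat) : Int)) :=
    pvRunLens_eq cs
  have hrne : pvRunLens cs ≠ [] := by
    rw [hrun]
    intro h
    have := congrArg List.length h
    simp at this
    omega
  obtain ⟨m, hm⟩ : ∃ m, PySem.List.max? (pvRunLens cs) id = some m := by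
    cases hq : PySem.List.max? (pvRunLens cs) id with
    | none => exact absurd ((PySem.List.max?_eq_none_iff _ _).mp hq) hrne
    | some m => exact ⟨m, rfl⟩
  have hm_mem := PySem.List.max?_mem hm
  have hm_ub := PySem.List.max?_isMax hm
  have hbest : m = ((pvMx cs n + 1 : Nat) : Int) := by
    rw [hrun] at hm_mem hm_ub
    obtain ⟨j, hj, he⟩ := List.mem_map.mp hm_mem
    have hj' := List.mem_range.mp hj
    have h1 : m ≤ ((pvMx cs n + 1 : Nat) : Int) := by
      rw [← he]
      have h2 := pvMx_le cs n j hj'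
      have h3 := pvRunN_pos cs j
      push_cast
      omega
    have h2 : ((pvMx cs n + 1 : Nat) : Int) ≤ m := by
      have : ((pvRunN cs ia : Nat) : Int) ∈ (List.range n).map
          (fun i => ((pvRunN cs i : Nat) : Int)) :=
        List.mem_map.mpr ⟨ia, List.mem_range.mpr hia, rfl⟩
      have h4 := hm_ub _ this
      have h5 := pvRunN_pos cs ia
      simp only [id] at h4
      have : pvRunN cs ia = pvMx cs n + 1 := by omega
      rw [this] at h4
      exact h4
    omega
  have hpredeq : (fun i => ((pvRunN cs i : Nat) : Int) == m)
      = (fun i => ((pvRunN cs i - 1 : Nat) : Int) == ((pvMx cs n : Nat) : Int)) := by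
    funext i
    rw [hbest]
    have := pvRunN_pos cs i
    rw [Bool.eq_iff_iff]
    simp only [beq_iff_eq]
    constructor <;> intro h <;> [omega; omega]
  have hidx : PySem.List.index? (pvRunLens cs) m = some i0 := by
    rw [PySem.List.index?, hrun, pvIdxOf?_map_range]
    have : (fun i => (fun i => ((pvRunN cs i : Nat) : Int)) i == m)
        = (fun i => ((pvRunN cs i : Nat) : Int) == m) := rfl
    rw [this, hpredeq, hf0]
  have hB : get_most_com_sub_alt s = ((PySem.Chars.count cs
      (PySem.List.slice cs (some (i0 : Int)) (some ((i0 : Int) + m)))) : Int) := by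
    rw [get_most_com_sub_alt]
    simp only [← hcs, hm, hidx, Option.getD_some]
  rw [hA, hB]
  congr 1
  rw [hbest]
  have hcast : ((i0 : Int) + ((pvMx cs n + 1 : Nat) : Int)) = (((i0 + (pvMx cs n + 1) : Nat)) : Int) := by
    push_cast; ring
  rw [hcast, PySem.List.slice_natCast]
  have : i0 + (pvMx cs n + 1) - i0 = pvMx cs n + 1 := by omega
  rw [this, pvVal_eq_take_drop cs i0 (by omega), hi0r]

-- ===== VERDICT (by name: the statement is the Claim_ definition above) =====
theorem get_most_com_sub_spec : Claim_equal_get_most_com_sub := by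
  intro s _hdom hpre
  unfold Spec_get_most_com_sub
  exact pv_main s hpre
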